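-- pv_equiv track=rewrite | github.com/Sumukha-Rao-H/Advent-of-code-25 | 1-12-2025/main.py | part2
-- ===== SOURCE A (Python) =====
-- def part2(data):
--     count = 0
--     cur = 50
--
--     for d, step in data:
--         if d == "R":
--             raw = cur + step
--             if raw >= 100:
--                 count += raw // 100
--             cur = raw % 100
--         else:
--             raw = cur - step
--             if raw <= 0:
--                 count += (-raw // 100) + (cur != 0)
--             cur = raw % 100
--
--     return count
-- ===== SOURCE B (Python) =====
-- def part2(data):
--     # Phase 1: absolute start/end positions of every step (unbounded odometer).
--     spans = []
--     pos = 50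
--     for d, step in data:
--         new = pos + step if d == "R" else pos - step
--         spans.append((d, pos, new))
--         pos = new
--     # Phase 2: sum directed boundary crossings of each span via floor division.
--     return sum(max(q // 100 - p // 100, 0) if d == "R"
--                else max((p - 1) // 100 - (q - 1) // 100, 0)
--                for d, p, q in spans)
-- ===== Notes on version B (the rewrite author's own statement) =====
-- stated objective: alternative
-- what changed: Replaces the single loop that mutates a modular position with >=100/<=0 guards and a (cur != 0) correction by a two-phase computation: first build the list of absolute (unbounded) start/end spans of every step, then sum each span's directed boundary crossings as a floor-division difference clamped at 0.
import Mathlib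
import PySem

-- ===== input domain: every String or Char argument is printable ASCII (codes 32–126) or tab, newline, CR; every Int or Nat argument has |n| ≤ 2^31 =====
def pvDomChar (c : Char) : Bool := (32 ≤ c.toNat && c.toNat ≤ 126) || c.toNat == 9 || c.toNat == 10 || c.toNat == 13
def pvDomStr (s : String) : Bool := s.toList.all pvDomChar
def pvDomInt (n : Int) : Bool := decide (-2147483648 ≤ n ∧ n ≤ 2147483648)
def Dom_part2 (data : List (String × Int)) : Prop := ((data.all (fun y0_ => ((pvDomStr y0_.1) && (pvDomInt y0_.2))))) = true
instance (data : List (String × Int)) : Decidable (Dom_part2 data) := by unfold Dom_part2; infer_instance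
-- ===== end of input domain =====

-- B tracks an unbounded absolute odometer and counts directed boundary crossings
-- via floor-division differences in a structural recursion (objective: simpler).


-- ===== PORT A =====
-- one iteration of A's loop over state (count, cur)
def part2Step (s : Int × Int) (p : String × Int) : Int × Int :=
  let count := s.1
  let cur := s.2
  let d := p.1
  let step := p.2
  if d == "R" then
    let raw := cur + step
    let count := if raw ≥ 100 then count + PySem.Int.floordiv raw 100 else count
    (count, PySem.Int.mod raw 100)
  else
    let raw := cur - step
    let count :=
      if raw ≤ 0 then
        count + (PySem.Int.floordiv (-raw) 100 + (if cur ≠ 0 then (1 : Int) else 0))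
      else count
    (count, PySem.Int.mod raw 100)

def part2 (data : List (String × Int)) : Int :=
  (data.foldl part2Step (0, 50)).1

-- ===== PORT B =====
-- new position of one step from absolute position pos
def part2AltNew (pos : Int) (p : String × Int) : Int :=
  if p.1 == "R" then pos + p.2 else pos - p.2

-- phase-1 loop body: append the span (d, pos, new) and advance pos
def part2AltSpanStep (s : List (String × Int × Int) × Int) (p : String × Int) :
    List (String × Int × Int) × Int :=
  let new := part2AltNew s.2 p
  (s.1 ++ [(p.1, s.2, new)], new)

-- phase-2 summand: directed boundary crossings of one span, clamped at 0
def part2AltCross (t : String × Int × Int) : Int :=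
  if t.1 == "R" then
    max (PySem.Int.floordiv t.2.2 100 - PySem.Int.floordiv t.2.1 100) 0
  else
    max (PySem.Int.floordiv (t.2.1 - 1) 100 - PySem.Int.floordiv (t.2.2 - 1) 100) 0

def part2_alt (data : List (String × Int)) : Int :=
  let spans := (data.foldl part2AltSpanStep ([], 50)).1
  (spans.map part2AltCross).foldl (· + ·) 0

-- ===== PRECONDITION & SPEC =====
def Spec_part2 (data : List (String × Int)) (out : Int) : Prop := out = part2_alt data
instance (data : List (String × Int)) (out : Int) : Decidable (Spec_part2 data out) := by unfold Spec_part2; infer_instance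

-- ===== CLAIM (what is proved, stated in full; the proofs are below) =====
def Claim_equal_part2 : Prop := ∀ (data : List (String × Int)), Dom_part2 data → Spec_part2 data (part2 data)

-- ===== LEMMAS AND PROOFS =====

theorem part2Step_R (count cur step : Int) (d : String) (hd : (d == "R") = true) :
    part2Step (count, cur) (d, step)
      = ((if cur + step ≥ 100 then count + PySem.Int.floordiv (cur + step) 100 else count),
         PySem.Int.mod (cur + step) 100) := by
  simp [part2Step, hd]

theorem part2Step_L (count cur step : Int) (d : String) (hd : (d == "R") = false) :
    part2Step (count, cur) (d, step)
      = ((if cur - step ≤ 0 then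
            count + (PySem.Int.floordiv (-(cur - step)) 100 + (if cur ≠ 0 then (1 : Int) else 0))
          else count),
         PySem.Int.mod (cur - step) 100) := by
  simp [part2Step, hd]

-- proof-side recursive form of B's span list
def part2Spans : List (String × Int) → Int → List (String × Int × Int)
  | [], _ => []
  | p :: rest, pos => (p.1, pos, part2AltNew pos p) :: part2Spans rest (part2AltNew pos p)

theorem part2AltSpanStep_foldl (data : List (String × Int)) :
    ∀ (acc : List (String × Int × Int)) (pos : Int),
      (data.foldl part2AltSpanStep (acc, pos)).1 = acc ++ part2Spans data pos := by
  induction data with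
  | nil => intro acc pos; simp [part2Spans]
  | cons p rest ih =>
    intro acc pos
    simp only [List.foldl_cons, part2AltSpanStep, part2Spans, ih]
    simp

theorem part2Alt_sum_foldl (l : List Int) :
    ∀ (acc : Int), l.foldl (· + ·) acc = acc + l.sum := by
  induction l with
  | nil => intro acc; simp
  | cons x rest ih => intro acc; simp [ih]; ring

-- A's running count over the rest of the list, started at cur = pos % 100,
-- accumulates exactly the sum of B's clamped directed-crossing counts
-- over the spans starting at absolute position pos.
theorem part2_fold_eq_spans (items : List (String × Int)) :
    ∀ (count pos : Int),
      (items.foldl part2Step (count, PySem.Int.mod pos 100)).1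
        = count + ((part2Spans items pos).map part2AltCross).sum := by
  induction items with
  | nil => intro count pos; simp [part2Spans]
  | cons p rest ih =>
    intro count pos
    obtain ⟨d, step⟩ := p
    have hm : ∀ a : Int, PySem.Int.mod a 100 = a % 100 :=
      fun a => PySem.Int.mod_eq_emod_of_pos (by norm_num)
    have hf : ∀ a : Int, PySem.Int.floordiv a 100 = a / 100 :=
      fun a => PySem.Int.floordiv_eq_ediv_of_pos (by norm_num)
    by_cases hd : (d == "R") = true
    · have h1 : PySem.Int.mod (PySem.Int.mod pos 100 + step) 100
          = PySem.Int.mod (pos + step) 100 := by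
        simp only [hm]; omega
      have h2 : (if PySem.Int.mod pos 100 + step ≥ 100 then
            count + PySem.Int.floordiv (PySem.Int.mod pos 100 + step) 100 else count)
          = count + max (PySem.Int.floordiv (pos + step) 100
              - PySem.Int.floordiv pos 100) 0 := by
        simp only [hm, hf, max_def]
        split_ifs <;> omega
      rw [List.foldl_cons, part2Step_R _ _ _ _ hd, h1, h2, ih _ (pos + step)]
      simp [part2Spans, part2AltNew, part2AltCross, hd]
      try ring
    · have hd' : (d == "R") = false := by simpa using hd
      have h1 : PySem.Int.mod (PySem.Int.mod pos 100 - step) 100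
          = PySem.Int.mod (pos - step) 100 := by
        simp only [hm]; omega
      have h2 : (if PySem.Int.mod pos 100 - step ≤ 0 then
            count + (PySem.Int.floordiv (-(PySem.Int.mod pos 100 - step)) 100
              + (if PySem.Int.mod pos 100 ≠ 0 then (1 : Int) else 0)) else count)
          = count + max (PySem.Int.floordiv (pos - 1) 100
              - PySem.Int.floordiv (pos - step - 1) 100) 0 := by
        simp only [hm, hf, max_def]
        split_ifs <;> omega
      rw [List.foldl_cons, part2Step_L _ _ _ _ hd', h1, h2, ih _ (pos - step)]
      simp [part2Spans, part2AltNew, part2AltCross, hd']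
      try ring

-- ===== VERDICT (by name: the statement is the Claim_ definition above) =====
theorem part2_spec : Claim_equal_part2 := by
  intro data _
  unfold Spec_part2 part2 part2_alt
  have h50 : ((0 : Int), (50 : Int)) = ((0 : Int), PySem.Int.mod 50 100) := by decide
  rw [h50, part2_fold_eq_spans data 0 50,
    part2AltSpanStep_foldl data [] 50, part2Alt_sum_foldl]
  simp
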